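-- pv_equiv track=rewrite | github.com/benquick123/code-profiling | code/batch-2/vse-naloge-brez-testov/DN7-Z-081.py | varen_premik
-- ===== SOURCE A (Python) =====
-- def preveri_mino(x, y, mine):
--
--     for x_koordinata,y_koordinata in mine:
--         if x_koordinata==x  and y_koordinata==y:
--             return True #true
--     return False
--
-- def varen_premik(x0,y0,x1,y1, mine):
--     for x in range(min(x0,x1), max(x0, x1)+1): #za vodoravno
--         if preveri_mino(x,y0,mine):
--             return False
--
--
--     for y in range(min(y0,y1),max(y0,y1)+1): #za navpično
--         if preveri_mino(x0,y, mine):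
--             return False
--
--     return True
-- ===== SOURCE B (Python) =====
-- def varen_premik(x0, y0, x1, y1, mine):
--     # one pass over the mines; closed-form membership test on the L-path
--     for mx, my in mine:
--         if (my == y0 and min(x0, x1) <= mx <= max(x0, x1)) or \
--            (mx == x0 and min(y0, y1) <= my <= max(y0, y1)):
--             return False
--     return True
-- ===== Notes on version B (the rewrite author's own statement) =====
-- stated objective: faster
-- what changed: Replaces the path-cell iteration with nested mine scans by a single pass over the mines using a closed-form interval test for membership on the L-path.
import Mathlib
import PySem

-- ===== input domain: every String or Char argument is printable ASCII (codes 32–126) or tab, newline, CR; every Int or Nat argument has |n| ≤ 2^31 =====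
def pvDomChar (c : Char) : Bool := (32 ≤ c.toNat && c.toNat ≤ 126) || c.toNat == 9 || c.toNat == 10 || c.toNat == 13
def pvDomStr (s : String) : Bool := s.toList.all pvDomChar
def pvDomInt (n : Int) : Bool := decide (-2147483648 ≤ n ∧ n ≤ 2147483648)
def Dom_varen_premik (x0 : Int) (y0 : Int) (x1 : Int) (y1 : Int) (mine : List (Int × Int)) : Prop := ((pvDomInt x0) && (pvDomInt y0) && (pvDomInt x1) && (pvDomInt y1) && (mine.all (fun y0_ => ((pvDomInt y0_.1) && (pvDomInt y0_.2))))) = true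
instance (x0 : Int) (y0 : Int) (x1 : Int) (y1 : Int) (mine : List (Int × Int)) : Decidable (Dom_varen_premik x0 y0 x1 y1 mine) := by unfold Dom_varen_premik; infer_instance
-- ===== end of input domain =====

-- ===== PORT A =====
-- A: for each cell of the horizontal then vertical segment, scan all mines
def preveri_mino (x : Int) (y : Int) (mine : List (Int × Int)) : Bool :=
  match mine with
  | [] => false
  | (xk, yk) :: rest =>
    if xk == x && yk == y then true else preveri_mino x y rest

def varen_premik (x0 : Int) (y0 : Int) (x1 : Int) (y1 : Int) (mine : List (Int × Int)) : Bool :=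
  if (PySem.List.pyRange (min x0 x1) (max x0 x1 + 1) 1).any (fun x => preveri_mino x y0 mine) then
    false
  else if (PySem.List.pyRange (min y0 y1) (max y0 y1 + 1) 1).any (fun y => preveri_mino x0 y mine) then
    false
  else
    true

-- ===== PORT B =====
-- B: one pass over the mines with a closed-form interval test for membership on the L-path
def varen_premik_alt (x0 : Int) (y0 : Int) (x1 : Int) (y1 : Int) (mine : List (Int × Int)) : Bool :=
  match mine with
  | [] => true
  | (mx, my) :: rest =>
    if (my == y0 && decide (min x0 x1 ≤ mx) && decide (mx ≤ max x0 x1))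
       || (mx == x0 && decide (min y0 y1 ≤ my) && decide (my ≤ max y0 y1)) then
      false
    else
      varen_premik_alt x0 y0 x1 y1 rest

-- ===== PRECONDITION & SPEC =====
def Spec_varen_premik (x0 : Int) (y0 : Int) (x1 : Int) (y1 : Int) (mine : List (Int × Int)) (out : Bool) : Prop := out = varen_premik_alt x0 y0 x1 y1 mine
instance (x0 : Int) (y0 : Int) (x1 : Int) (y1 : Int) (mine : List (Int × Int)) (out : Bool) : Decidable (Spec_varen_premik x0 y0 x1 y1 mine out) := by unfold Spec_varen_premik; infer_instance

-- ===== CLAIM (what is proved, stated in full; the proofs are below) =====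
def Claim_equal_varen_premik : Prop := ∀ (x0 : Int) (y0 : Int) (x1 : Int) (y1 : Int) (mine : List (Int × Int)), Dom_varen_premik x0 y0 x1 y1 mine → Spec_varen_premik x0 y0 x1 y1 mine (varen_premik x0 y0 x1 y1 mine)

-- ===== LEMMAS AND PROOFS =====
theorem preveri_mino_iff (x y : Int) (mine : List (Int × Int)) :
    preveri_mino x y mine = true ↔ (x, y) ∈ mine := by
  induction mine with
  | nil => simp [preveri_mino]
  | cons p rest ih =>
    obtain ⟨xk, yk⟩ := p
    simp only [preveri_mino, List.mem_cons, Prod.mk.injEq]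
    split_ifs with h
    · simp only [Bool.and_eq_true, beq_iff_eq] at h
      simp [h.1, h.2]
    · simp only [Bool.and_eq_true, beq_iff_eq, not_and] at h
      rw [ih]
      constructor
      · exact fun hm => Or.inr hm
      · rintro (⟨hx, hy⟩ | hm)
        · exact absurd hy.symm (h hx.symm)
        · exact hm

theorem varen_premik_alt_iff (x0 y0 x1 y1 : Int) (mine : List (Int × Int)) :
    varen_premik_alt x0 y0 x1 y1 mine = true ↔
      ∀ p ∈ mine,
        ¬ ((p.2 = y0 ∧ min x0 x1 ≤ p.1 ∧ p.1 ≤ max x0 x1) ∨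
           (p.1 = x0 ∧ min y0 y1 ≤ p.2 ∧ p.2 ≤ max y0 y1)) := by
  induction mine with
  | nil => simp [varen_premik_alt]
  | cons p rest ih =>
    obtain ⟨mx, my⟩ := p
    simp only [varen_premik_alt]
    split_ifs with h
    · simp only [Bool.or_eq_true, Bool.and_eq_true, beq_iff_eq, decide_eq_true_eq] at h
      simp only [false_iff]
      intro hall
      have := hall (mx, my) (List.mem_cons_self ..)
      rcases h with ⟨⟨h1, h2⟩, h3⟩ | ⟨⟨h1, h2⟩, h3⟩
      · exact this (Or.inl ⟨h1, h2, h3⟩)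
      · exact this (Or.inr ⟨h1, h2, h3⟩)
    · simp only [Bool.or_eq_true, Bool.and_eq_true, beq_iff_eq, decide_eq_true_eq,
        not_or, not_and] at h
      rw [ih]
      constructor
      · intro hall q hq
        rcases List.mem_cons.mp hq with rfl | hq'
        · rintro (⟨h1, h2, h3⟩ | ⟨h1, h2, h3⟩)
          · exact h.1 ⟨h1, h2⟩ h3
          · exact h.2 ⟨h1, h2⟩ h3
        · exact hall q hq'
      · exact fun hall q hq => hall q (List.mem_cons_of_mem _ hq)

theorem varen_premik_iff (x0 y0 x1 y1 : Int) (mine : List (Int × Int)) :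
    varen_premik x0 y0 x1 y1 mine = true ↔
      (∀ x : Int, min x0 x1 ≤ x → x < max x0 x1 + 1 → (x, y0) ∉ mine) ∧
      (∀ y : Int, min y0 y1 ≤ y → y < max y0 y1 + 1 → (x0, y) ∉ mine) := by
  unfold varen_premik
  split_ifs with h1 h2
  · simp only [false_iff]
    rw [List.any_eq_true] at h1
    obtain ⟨x, hx, hp⟩ := h1
    rw [PySem.List.mem_pyRange_one] at hx
    rw [preveri_mino_iff] at hp
    exact fun hc => hc.1 x hx.1 hx.2 hp
  · simp only [false_iff]
    rw [List.any_eq_true] at h2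
    obtain ⟨y, hy, hp⟩ := h2
    rw [PySem.List.mem_pyRange_one] at hy
    rw [preveri_mino_iff] at hp
    exact fun hc => hc.2 y hy.1 hy.2 hp
  · simp only [true_iff]
    rw [List.any_eq_true] at h1 h2
    constructor
    · intro x hxl hxr hm
      exact h1 ⟨x, PySem.List.mem_pyRange_one.mpr ⟨hxl, hxr⟩, (preveri_mino_iff _ _ _).mpr hm⟩
    · intro y hyl hyr hm
      exact h2 ⟨y, PySem.List.mem_pyRange_one.mpr ⟨hyl, hyr⟩, (preveri_mino_iff _ _ _).mpr hm⟩

-- ===== VERDICT (by name: the statement is the Claim_ definition above) =====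
theorem varen_premik_spec : Claim_equal_varen_premik := by
  intro x0 y0 x1 y1 mine _
  unfold Spec_varen_premik
  rw [Bool.eq_iff_iff, varen_premik_iff, varen_premik_alt_iff]
  constructor
  · rintro ⟨hH, hV⟩ ⟨mx, my⟩ hm hc
    rcases hc with ⟨h1, h2, h3⟩ | ⟨h1, h2, h3⟩
    · exact hH mx h2 (by omega) (h1 ▸ hm)
    · exact hV my h2 (by omega) (h1 ▸ hm)
  · intro hall
    constructor
    · intro x hxl hxr hm
      exact hall (x, y0) hm (Or.inl ⟨rfl, hxl, by omega⟩)
    · intro y hyl hyr hm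
      exact hall (x0, y) hm (Or.inr ⟨rfl, hyl, by omega⟩)
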